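-- pv_equiv track=rewrite | github.com/shaolinpat/ecg_cnn_pytorch | ecg_cnn/data/data_utils.py | select_primary_label
-- ===== SOURCE A (Python) =====
-- FIVE_SUPERCLASSES = ["CD", "HYP", "MI", "NORM", "STTC"]
--
-- def select_primary_label(label_list):
--     """
--     Select a single diagnostic superclass from a list of possible labels.
--
--     Given a list of diagnostic superclass labels (e.g., ["MI", "NORM"]),
--     this function returns the first known class found according to a fixed
--     priority defined in FIVE_SUPERCLASSES. If no recognized label is found,
--     it returns "Unknown".
--
--     Parameters
--     ----------
--     label_list : list or set of str
--         A collection of diagnostic superclass labels. Typical inputs are the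
--         outputs from `aggregate_diagnostic()`.
--
--     Returns
--     -------
--     str
--         A single superclass label (e.g., "MI", "NORM") if a known class is found,
--         or "Unknown" if the input is empty or contains no recognized classes.
--
--     Raises
--     ------
--     TypeError
--         If `label_list` is not a list, set, or tuple of strings.
--     """
--
--     if not isinstance(label_list, (list, set, tuple)):
--         raise TypeError(
--             f"label_list must be a list, set, or tuple, got {type(label_list)}"
--         )
--
--     if not all(isinstance(label, str) for label in label_list):
--         raise TypeError("All elements in label_list must be strings.")
--
--     for cls in FIVE_SUPERCLASSES:
--         if cls in label_list:
--             return cls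
--     return "Unknown"
-- ===== SOURCE B (Python) =====
-- FIVE_SUPERCLASSES = ["CD", "HYP", "MI", "NORM", "STTC"]
--
-- _RANK = {c: i for i, c in enumerate(FIVE_SUPERCLASSES)}
--
--
-- def select_primary_label(label_list):
--     if not isinstance(label_list, (list, set, tuple)):
--         raise TypeError(
--             f"label_list must be a list, set, or tuple, got {type(label_list)}"
--         )
--
--     if not all(isinstance(label, str) for label in label_list):
--         raise TypeError("All elements in label_list must be strings.")
--
--     best = None
--     for label in label_list:
--         r = _RANK.get(label)
--         if r is not None and (best is None or r < best[0]):
--             best = (r, label)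
--     return best[1] if best is not None else "Unknown"
-- ===== Notes on version B (the rewrite author's own statement) =====
-- stated objective: alternative
-- what changed: B makes one pass over label_list with a precomputed priority-rank dict, keeping the best (lowest-rank) known label seen so far, instead of A's loop over the five fixed classes with a membership scan of label_list per class.
import Mathlib
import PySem

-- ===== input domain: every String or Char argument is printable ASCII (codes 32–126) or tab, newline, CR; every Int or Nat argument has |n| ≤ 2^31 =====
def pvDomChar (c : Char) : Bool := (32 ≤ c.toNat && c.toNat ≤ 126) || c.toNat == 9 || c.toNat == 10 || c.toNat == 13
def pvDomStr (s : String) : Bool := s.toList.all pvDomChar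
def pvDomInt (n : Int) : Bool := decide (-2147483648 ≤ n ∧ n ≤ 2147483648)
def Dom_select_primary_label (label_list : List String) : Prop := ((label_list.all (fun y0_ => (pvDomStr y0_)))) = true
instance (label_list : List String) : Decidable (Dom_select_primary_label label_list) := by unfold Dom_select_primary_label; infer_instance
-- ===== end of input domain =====

-- B scans label_list once with a precomputed priority-rank dict instead of A's loop
-- over the five fixed classes with a membership scan per class (objective: alternative).

-- ===== PORT A =====
def FIVE_SUPERCLASSES : List String := ["CD", "HYP", "MI", "NORM", "STTC"]

-- the 'for cls in FIVE_SUPERCLASSES: if cls in label_list: return cls' loop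
def selLoopA : List String → List String → Option String
  | [], _ => none
  | c :: cs, xs => if c ∈ xs then some c else selLoopA cs xs

def select_primary_label (label_list : List String) : String :=
  -- the two isinstance TypeError guards never fire on a List String input
  (selLoopA FIVE_SUPERCLASSES label_list).getD "Unknown"

-- ===== PORT B =====
-- _RANK = {c: i for i, c in enumerate(FIVE_SUPERCLASSES)}
def rankDict : PySem.Dict String Int :=
  (PySem.List.enumerate FIVE_SUPERCLASSES).foldl (fun d p => d.insert p.2 p.1) PySem.Dict.empty

-- one iteration of B's 'for label in label_list' loop
def stepB (best : Option (Int × String)) (label : String) : Option (Int × String) :=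
  match rankDict.get? label with
  | none => best
  | some r =>
    match best with
    | none => some (r, label)
    | some (r0, l0) => if r < r0 then some (r, label) else some (r0, l0)

def select_primary_label_alt (label_list : List String) : String :=
  match label_list.foldl stepB none with
  | none => "Unknown"
  | some (_, l) => l

-- ===== PRECONDITION & SPEC =====
def Spec_select_primary_label (label_list : List String) (out : String) : Prop := out = select_primary_label_alt label_list
instance (label_list : List String) (out : String) : Decidable (Spec_select_primary_label label_list out) := by unfold Spec_select_primary_label; infer_instance

-- ===== CLAIM (what is proved, stated in full; the proofs are below) =====
def Claim_equal_select_primary_label : Prop := ∀ (label_list : List String), Dom_select_primary_label label_list → Spec_select_primary_label label_list (select_primary_label label_list)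

-- ===== LEMMAS AND PROOFS =====

-- left-biased min-by-rank merge: stepB best l = mrg best (pairOf l)
def pairOf (l : String) : Option (Int × String) := (rankDict.get? l).map (fun r => (r, l))

def mrg : Option (Int × String) → Option (Int × String) → Option (Int × String)
  | none, b => b
  | a, none => a
  | some (r1, s1), some (r2, s2) => if r2 < r1 then some (r2, s2) else some (r1, s1)

-- the min-by-rank pair of a list, head-first
def MB : List String → Option (Int × String)
  | [] => none
  | l :: t => mrg (pairOf l) (MB t)

theorem mrg_none_right (x : Option (Int × String)) : mrg x none = x := by
  cases x with
  | none => rfl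
  | some p => obtain ⟨r, s⟩ := p; rfl

theorem stepB_eq_mrg (b : Option (Int × String)) (l : String) : stepB b l = mrg b (pairOf l) := by
  cases b with
  | none => simp [stepB, pairOf]; cases rankDict.get? l <;> simp [mrg]
  | some p =>
    obtain ⟨r0, l0⟩ := p
    simp [stepB, pairOf]
    cases rankDict.get? l <;> simp [mrg]

theorem mrg_assoc (a b c : Option (Int × String)) : mrg (mrg a b) c = mrg a (mrg b c) := by
  cases a with
  | none => simp [mrg]
  | some p =>
    cases b with
    | none => simp [mrg]
    | some q =>
      cases c with
      | none => simp [mrg_none_right]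
      | some w =>
        obtain ⟨r1, s1⟩ := p; obtain ⟨r2, s2⟩ := q; obtain ⟨r3, s3⟩ := w
        by_cases h12 : r2 < r1 <;> by_cases h23 : r3 < r2 <;> by_cases h13 : r3 < r1 <;>
          simp [mrg, h12, h23, h13] <;> exfalso <;> omega

theorem foldB_eq (xs : List String) (acc : Option (Int × String)) :
    xs.foldl stepB acc = mrg acc (MB xs) := by
  induction xs generalizing acc with
  | nil => simp [MB, mrg_none_right]
  | cons l t ih =>
    simp only [List.foldl_cons, MB]
    rw [stepB_eq_mrg, ih, ← mrg_assoc]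

theorem rank_eq : rankDict = PySem.Dict.mk [("CD", (0:Int)), ("HYP", 1), ("MI", 2), ("NORM", 3), ("STTC", 4)] := by decide

-- rank lookup characterized
theorem rank_cases (s : String) (r : Int) (h : rankDict.get? s = some r) :
    (s = "CD" ∧ r = 0) ∨ (s = "HYP" ∧ r = 1) ∨ (s = "MI" ∧ r = 2) ∨
    (s = "NORM" ∧ r = 3) ∨ (s = "STTC" ∧ r = 4) := by
  rw [rank_eq] at h
  simp only [PySem.Dict.get?_mk_cons] at h
  split_ifs at h with h1 h2 h3 h4 h5 <;>
    simp_all [PySem.Dict.get?]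

-- invariant: MB xs = some (r, s) → s ∈ xs and s has rank r
theorem MB_inv (xs : List String) (r : Int) (s : String) (h : MB xs = some (r, s)) :
    s ∈ xs ∧ rankDict.get? s = some r := by
  induction xs with
  | nil => simp [MB] at h
  | cons l t ih =>
    simp only [MB, pairOf] at h
    cases hr : rankDict.get? l with
    | none =>
      rw [hr] at h
      simp only [Option.map_none, mrg] at h
      have := ih h
      exact ⟨List.mem_cons_of_mem _ this.1, this.2⟩
    | some rl =>
      rw [hr] at h
      simp only [Option.map_some] at h
      cases hm : MB t with
      | none =>
        rw [hm, mrg_none_right] at h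
        simp only [Option.some.injEq, Prod.mk.injEq] at h
        obtain ⟨h1, h2⟩ := h
        subst h1; subst h2
        exact ⟨List.mem_cons_self, hr⟩
      | some q =>
        obtain ⟨r2, s2⟩ := q
        rw [hm] at h
        simp only [mrg] at h
        split_ifs at h with hlt <;>
          simp only [Option.some.injEq, Prod.mk.injEq] at h <;>
          obtain ⟨h1, h2⟩ := h <;> subst h1 <;> subst h2
        · exact ⟨List.mem_cons_of_mem _ (ih hm).1, (ih hm).2⟩
        · exact ⟨List.mem_cons_self, hr⟩

-- if no known class occurs in xs, MB xs = none
theorem MB_none (xs : List String)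
    (h : ∀ c ∈ FIVE_SUPERCLASSES, c ∉ xs) : MB xs = none := by
  cases hm : MB xs with
  | none => rfl
  | some p =>
    obtain ⟨r, s⟩ := p
    obtain ⟨hmem, hr⟩ := MB_inv xs r s hm
    rcases rank_cases s r hr with ⟨e,_⟩|⟨e,_⟩|⟨e,_⟩|⟨e,_⟩|⟨e,_⟩ <;>
      exact absurd hmem (by rw [e]; exact h _ (by simp [FIVE_SUPERCLASSES]))

-- generic step: if the k-ranked class is present and no lower-ranked class is, MB picks it
theorem MB_pick (xs : List String) (k : Int) (cls : String)
    (hk : rankDict.get? cls = some k)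
    (hin : cls ∈ xs)
    (hlow : ∀ s r, rankDict.get? s = some r → r < k → s ∉ xs) :
    MB xs = some (k, cls) := by
  induction xs with
  | nil => simp at hin
  | cons l t ih =>
    have hlow' : ∀ s r, rankDict.get? s = some r → r < k → s ∉ t := by
      intro s r hs hr hmem
      exact hlow s r hs hr (List.mem_cons_of_mem _ hmem)
    by_cases hl : l = cls
    · subst hl
      simp only [MB, pairOf, hk, Option.map_some]
      cases hm : MB t with
      | none => simp [mrg_none_right]
      | some p =>
        obtain ⟨r2, s2⟩ := p
        obtain ⟨hmem2, hr2⟩ := MB_inv t r2 s2 hm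
        have : ¬ r2 < k := fun hlt => hlow' s2 r2 hr2 hlt hmem2
        simp [mrg, this]
    · have hin' : cls ∈ t := by
        rcases List.mem_cons.mp hin with h | h
        · exact absurd h.symm hl
        · exact h
      have ihm := ih hin' hlow'
      simp only [MB, pairOf, ihm]
      cases hr : rankDict.get? l with
      | none => simp [mrg]
      | some rl =>
        have hge : ¬ rl < k := fun hlt => hlow l rl hr hlt (List.mem_cons_self)
        have hne : rl ≠ k := by
          intro he
          subst he
          rcases rank_cases l rl hr with ⟨e,f⟩|⟨e,f⟩|⟨e,f⟩|⟨e,f⟩|⟨e,f⟩ <;>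
            rcases rank_cases cls rl hk with ⟨e',f'⟩|⟨e',f'⟩|⟨e',f'⟩|⟨e',f'⟩|⟨e',f'⟩ <;>
              simp_all
        have hlt : k < rl := by omega
        simp [mrg, hlt]

-- no class of rank < k is in xs, given per-class non-membership facts
theorem lower_absent (xs : List String) (k : Int) (hk : k ≤ 4)
    (hcd : k ≤ 0 ∨ "CD" ∉ xs) (hhyp : k ≤ 1 ∨ "HYP" ∉ xs)
    (hmi : k ≤ 2 ∨ "MI" ∉ xs) (hnorm : k ≤ 3 ∨ "NORM" ∉ xs) :
    ∀ s r, rankDict.get? s = some r → r < k → s ∉ xs := by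
  intro s r hs hr
  rcases rank_cases s r hs with ⟨e,f⟩|⟨e,f⟩|⟨e,f⟩|⟨e,f⟩|⟨e,f⟩ <;> subst e <;> subst f
  · rcases hcd with h | h
    · exact absurd hr (by omega)
    · exact h
  · rcases hhyp with h | h
    · exact absurd hr (by omega)
    · exact h
  · rcases hmi with h | h
    · exact absurd hr (by omega)
    · exact h
  · rcases hnorm with h | h
    · exact absurd hr (by omega)
    · exact h
  · exact absurd hr (by omega)

theorem rank_CD : rankDict.get? "CD" = some 0 := by decide
theorem rank_HYP : rankDict.get? "HYP" = some 1 := by decide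
theorem rank_MI : rankDict.get? "MI" = some 2 := by decide
theorem rank_NORM : rankDict.get? "NORM" = some 3 := by decide
theorem rank_STTC : rankDict.get? "STTC" = some 4 := by decide

-- ===== VERDICT (by name: the statement is the Claim_ definition above) =====
theorem select_primary_label_spec : Claim_equal_select_primary_label := by
  intro xs _
  unfold Spec_select_primary_label
  unfold select_primary_label select_primary_label_alt
  rw [foldB_eq]
  simp only [mrg]
  by_cases hcd : "CD" ∈ xs
  · rw [MB_pick xs 0 "CD" rank_CD hcd (by intro s r hs hr; rcases rank_cases s r hs with ⟨e,f⟩|⟨e,f⟩|⟨e,f⟩|⟨e,f⟩|⟨e,f⟩ <;> exact absurd hr (by omega))]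
    simp [selLoopA, FIVE_SUPERCLASSES, hcd]
  · by_cases hhyp : "HYP" ∈ xs
    · rw [MB_pick xs 1 "HYP" rank_HYP hhyp
        (lower_absent xs 1 (by omega) (Or.inr hcd) (Or.inl (by omega)) (Or.inl (by omega)) (Or.inl (by omega)))]
      simp [selLoopA, FIVE_SUPERCLASSES, hcd, hhyp]
    · by_cases hmi : "MI" ∈ xs
      · rw [MB_pick xs 2 "MI" rank_MI hmi
          (lower_absent xs 2 (by omega) (Or.inr hcd) (Or.inr hhyp) (Or.inl (by omega)) (Or.inl (by omega)))]
        simp [selLoopA, FIVE_SUPERCLASSES, hcd, hhyp, hmi]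
      · by_cases hnorm : "NORM" ∈ xs
        · rw [MB_pick xs 3 "NORM" rank_NORM hnorm
            (lower_absent xs 3 (by omega) (Or.inr hcd) (Or.inr hhyp) (Or.inr hmi) (Or.inl (by omega)))]
          simp [selLoopA, FIVE_SUPERCLASSES, hcd, hhyp, hmi, hnorm]
        · by_cases hsttc : "STTC" ∈ xs
          · rw [MB_pick xs 4 "STTC" rank_STTC hsttc
              (lower_absent xs 4 (by omega) (Or.inr hcd) (Or.inr hhyp) (Or.inr hmi) (Or.inr hnorm))]
            simp [selLoopA, FIVE_SUPERCLASSES, hcd, hhyp, hmi, hnorm, hsttc]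
          · rw [MB_none xs (by intro c hc; fin_cases hc <;> assumption)]
            simp [selLoopA, FIVE_SUPERCLASSES, hcd, hhyp, hmi, hnorm, hsttc]
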